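-- pv_equiv track=rewrite | github.com/aongenae/leetcode | src/reverse_words_in_string.py | _iter_words
-- ===== SOURCE A (Python) =====
-- def _iter_words(s):
--     letter = False
--     space = False
--     upper = len(s)-1
--     first = upper
--     last = upper
--     for char_idx in range(upper, -1, -1):
--         if s[char_idx] == ' ':
--             space = True
--         else:
--             if not letter:
--                 last = char_idx
--                 space = False
--             letter = True
--             first = char_idx
--         if letter:
--             if space or char_idx == 0:
--                 yield (first, last)
--                 letter = False
-- ===== SOURCE B (Python) =====
-- def _iter_words(s):
--     # Forward single pass: collect (start, end) inclusive spans of maximal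
--     # runs of non-space characters, then yield them in reverse order.
--     spans = []
--     start = None
--     for i, c in enumerate(s):
--         if c == ' ':
--             if start is not None:
--                 spans.append((start, i - 1))
--                 start = None
--         elif start is None:
--             start = i
--     if start is not None:
--         spans.append((start, len(s) - 1))
--     yield from reversed(spans)
-- ===== Notes on version B (the rewrite author's own statement) =====
-- stated objective: alternative
-- what changed: Replaces the right-to-left letter/space boolean state machine with a forward single pass that collects (start,end) word spans in a list and then yields them in reverse order.
import Mathlib
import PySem

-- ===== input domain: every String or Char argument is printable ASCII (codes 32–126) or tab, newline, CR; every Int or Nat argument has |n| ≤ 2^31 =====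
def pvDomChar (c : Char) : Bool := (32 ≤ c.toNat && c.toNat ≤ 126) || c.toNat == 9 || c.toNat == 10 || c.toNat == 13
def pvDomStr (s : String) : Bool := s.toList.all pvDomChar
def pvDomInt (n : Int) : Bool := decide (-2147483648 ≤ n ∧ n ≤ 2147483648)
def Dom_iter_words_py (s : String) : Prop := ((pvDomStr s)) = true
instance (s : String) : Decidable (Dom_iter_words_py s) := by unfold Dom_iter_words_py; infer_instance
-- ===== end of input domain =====

-- B replaces A's right-to-left letter/space state machine with a forward span scan whose
-- result is yielded in reverse; equivalence of the RETURN values is proved for all strings.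

-- ===== PORT A =====
-- one iteration of A's loop body at index i, char c, state (letter, space, first, last);
-- returns (yielded pairs, letter, space, first, last) after the body
def aStep (i : Nat) (c : Char) (letter space : Bool) (first last : Int) :
    List (Int × Int) × Bool × Bool × Int × Int :=
  let space1 := if c = ' ' then true else if letter then space else false
  let last1 := if c = ' ' then last else if letter then last else (i : Int)
  let letter1 := if c = ' ' then letter else true
  let first1 := if c = ' ' then first else (i : Int)
  if letter1 && (space1 || i == 0) then
    ([(first1, last1)], false, space1, first1, last1)
  else
    ([], letter1, space1, first1, last1)

-- A's `for char_idx in range(upper, -1, -1)` loop, i counting down to 0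
def aLoop (cs : List Char) : Nat → Bool → Bool → Int → Int → List (Int × Int)
  | 0, letter, space, first, last => (aStep 0 (cs.getD 0 ' ') letter space first last).1
  | (i+1), letter, space, first, last =>
    match aStep (i+1) (cs.getD (i+1) ' ') letter space first last with
    | (ys, l2, sp2, f2, la2) => ys ++ aLoop cs i l2 sp2 f2 la2

def iter_words_py (s : String) : List (Int × Int) :=
  match s.toList.length with
  | 0 => []
  | n+1 => aLoop s.toList n false false (n : Int) (n : Int)

-- ===== PORT B =====
-- forward scan of Source B: i is the current index, the Option carries the start of the open word
def scanB : List Char → Nat → Option Nat → List (Int × Int)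
  | [], _, none => []
  | [], i, some st => [((st : Int), (i : Int) - 1)]
  | c :: rest, i, none =>
      if c = ' ' then scanB rest (i+1) none else scanB rest (i+1) (some i)
  | c :: rest, i, some st =>
      if c = ' ' then ((st : Int), (i : Int) - 1) :: scanB rest (i+1) none
      else scanB rest (i+1) (some st)

def iter_words_py_alt (s : String) : List (Int × Int) :=
  (scanB s.toList 0 none).reverse

-- ===== PRECONDITION & SPEC =====
def Spec_iter_words_py (s : String) (out : List (Int × Int)) : Prop := out = iter_words_py_alt s
instance (s : String) (out : List (Int × Int)) : Decidable (Spec_iter_words_py s out) := by unfold Spec_iter_words_py; infer_instance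

-- ===== CLAIM (what is proved, stated in full; the proofs are below) =====
def Claim_equal_iter_words_py : Prop := ∀ (s : String), Dom_iter_words_py s → Spec_iter_words_py s (iter_words_py s)

-- ===== LEMMAS AND PROOFS =====

-- state reached at the end of B's scan (the pending word start, if any)
def fstate : List Char → Nat → Option Nat → Option Nat
  | [], _, o => o
  | c :: rest, i, o =>
      fstate rest (i+1) (if c = ' ' then none else (match o with | none => some i | some st => some st))

-- pairs emitted by B's scan before the final flush
def emitted : List Char → Nat → Option Nat → List (Int × Int)
  | [], _, _ => []
  | c :: rest, i, o =>
      (if c = ' ' then (match o with | some st => [((st : Int), (i : Int) - 1)] | none => []) else [])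
        ++ emitted rest (i+1) (if c = ' ' then none else (match o with | none => some i | some st => some st))

def flushP (i len : Nat) : Option Nat → List (Int × Int)
  | none => []
  | some st => [((st : Int), (i : Int) + (len : Int) - 1)]

-- the prefix of ds before its maximal trailing run of non-space characters
def splitTrail (ds : List Char) : List Char :=
  (ds.reverse.dropWhile (fun c => !(c == ' '))).reverse

theorem flushP_succ (i len : Nat) (o : Option Nat) : flushP (i+1) len o = flushP i (len+1) o := by
  cases o <;> simp [flushP] <;> push_cast <;> ring

theorem scanB_decomp (xs : List Char) : ∀ (i : Nat) (o : Option Nat),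
    scanB xs i o = emitted xs i o ++ flushP i xs.length (fstate xs i o) := by
  induction xs with
  | nil => intro i o; cases o <;> simp [scanB, emitted, fstate, flushP]
  | cons c rest ih =>
    intro i o
    by_cases hc : c = ' ' <;> cases o <;>
      simp [scanB, emitted, fstate, hc, ih, flushP_succ, List.append_assoc]

theorem fstate_snoc (xs : List Char) : ∀ (c : Char) (i : Nat) (o : Option Nat),
    fstate (xs ++ [c]) i o =
      (if c = ' ' then none
       else (match fstate xs i o with | none => some (i + xs.length) | some st => some st)) := by
  induction xs with
  | nil => intro c i o; cases o <;> simp [fstate]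
  | cons d rest ih =>
    intro c i o
    simp only [List.cons_append, fstate, ih]
    have : i + 1 + rest.length = i + (rest.length + 1) := by omega
    simp [this]

theorem emitted_snoc (xs : List Char) : ∀ (c : Char) (i : Nat) (o : Option Nat),
    emitted (xs ++ [c]) i o =
      emitted xs i o ++
        (if c = ' '
         then (match fstate xs i o with
               | some st => [((st : Int), (i : Int) + (xs.length : Int) - 1)]
               | none => [])
         else []) := by
  induction xs with
  | nil => intro c i o; cases o <;> simp [emitted, fstate]
  | cons d rest ih =>
    intro c i o
    simp only [List.cons_append, emitted, fstate, ih, List.append_assoc]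
    have : ((i : Int) + 1) + (rest.length : Int) - 1 = (i : Int) + ((rest.length : Int) + 1) - 1 := by ring
    push_cast
    simp [this]

theorem splitTrail_nil : splitTrail [] = [] := by simp [splitTrail]

theorem splitTrail_snoc_nonspace (es : List Char) (c : Char) (hc : c ≠ ' ') :
    splitTrail (es ++ [c]) = splitTrail es := by
  simp [splitTrail, List.dropWhile, hc]

theorem splitTrail_snoc_space (es : List Char) :
    splitTrail (es ++ [' ']) = es ++ [' '] := by
  simp [splitTrail, List.dropWhile]

-- the three splitTrail facts, proved together by snoc induction
theorem splitTrail_facts (es : List Char) :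
    emitted es 0 none = emitted (splitTrail es) 0 none ∧
    fstate (splitTrail es) 0 none = none ∧
    (match fstate es 0 none with | some st => st | none => es.length) = (splitTrail es).length := by
  induction es using List.reverseRecOn with
  | nil => simp [splitTrail_nil, fstate, emitted]
  | append_singleton fs d ih =>
    by_cases hd : d = ' '
    · subst hd
      refine ⟨by rw [splitTrail_snoc_space], ?_, ?_⟩
      · rw [splitTrail_snoc_space, fstate_snoc]; simp
      · rw [splitTrail_snoc_space, fstate_snoc]; simp
    · obtain ⟨ih1, ih2, ih3⟩ := ih
      rw [splitTrail_snoc_nonspace fs d hd]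
      refine ⟨?_, ih2, ?_⟩
      · rw [emitted_snoc]; simp [hd, ih1]
      · rw [fstate_snoc]
        simp only [hd, if_false]
        cases h : fstate fs 0 none with
        | none => simpa [h] using ih3
        | some st => simpa [h] using ih3

theorem scanB_snoc_space (es : List Char) (i : Nat) (o : Option Nat) :
    scanB (es ++ [' ']) i o = scanB es i o := by
  rw [scanB_decomp, scanB_decomp, emitted_snoc, fstate_snoc]
  cases h : fstate es i o <;> simp [h, flushP]

theorem scanB_snoc_word (es : List Char) (c : Char) (hc : c ≠ ' ') :
    scanB (es ++ [c]) 0 none =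
      scanB (splitTrail es) 0 none ++ [(((splitTrail es).length : Int), (es.length : Int))] := by
  obtain ⟨h1, h2, h3⟩ := splitTrail_facts es
  rw [scanB_decomp, scanB_decomp (splitTrail es), emitted_snoc, fstate_snoc, h2]
  cases h : fstate es 0 none with
  | none =>
    rw [h] at h3
    simp only [flushP, hc, if_false, ← h1, ← h3]
    simp [flushP]
  | some st =>
    rw [h] at h3
    simp only [flushP, hc, if_false, ← h1, ← h3]
    simp [flushP]

theorem aLoop_prefix (ds : List Char) (c : Char) : ∀ (i : Nat), i < ds.length →
    ∀ (l sp : Bool) (f la : Int), aLoop (ds ++ [c]) i l sp f la = aLoop ds i l sp f la := by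
  intro i
  induction i with
  | zero =>
    intro hi l sp f la
    have hg : (ds ++ [c]).getD 0 ' ' = ds.getD 0 ' ' := by
      cases ds with
      | nil => simp at hi
      | cons d t => rfl
    simp only [aLoop]
    rw [hg]
  | succ j ih =>
    intro hi l sp f la
    have hg : (ds ++ [c]).getD (j+1) ' ' = ds.getD (j+1) ' ' := by
      simp [List.getD, List.getElem?_append_left hi]
    simp only [aLoop]
    rw [hg, ih (by omega)]

theorem getD_snoc_len (es : List Char) (c : Char) : (es ++ [c]).getD es.length ' ' = c := by
  simp [List.getD]

-- the main invariant: A's right-to-left loop over ds, entered with letter=false (no open word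
-- to the right) or letter=true (open word ending at la, with first = ds.length), expressed
-- through B's forward scan
theorem main_inv (ds : List Char) (hne : ds ≠ []) :
    (∀ (sp : Bool) (f la : Int),
        aLoop ds (ds.length - 1) false sp f la = (scanB ds 0 none).reverse) ∧
    (∀ (la : Int),
        aLoop ds (ds.length - 1) true false ((ds.length : Int)) la =
          (((splitTrail ds).length : Int), la) :: (scanB (splitTrail ds) 0 none).reverse) := by
  induction ds using List.reverseRecOn with
  | nil => exact absurd rfl hne
  | append_singleton es c ih =>
    by_cases hes : es = []
    · subst hes
      by_cases hc : c = ' '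
      · subst hc
        refine ⟨fun sp f la => by simp [aLoop, aStep, scanB],
                fun la => by simp [aLoop, aStep, splitTrail, scanB]⟩
      · refine ⟨fun sp f la => by simp [aLoop, aStep, hc, scanB],
                fun la => by simp [aLoop, aStep, hc, splitTrail, List.dropWhile, scanB]⟩
    · obtain ⟨ih1, ih2⟩ := ih hes
      obtain ⟨m, hm⟩ : ∃ m, es.length = m + 1 := by
        cases es with
        | nil => exact absurd rfl hes
        | cons d t => exact ⟨t.length, by simp⟩
      have hm' : es.length - 1 = m := by omega
      have hmlt : m < es.length := by omega
      have hlen : (es ++ [c]).length - 1 = m + 1 := by simp [hm]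
      have hg : (es ++ [c]).getD (m + 1) ' ' = c := by rw [← hm]; exact getD_snoc_len es c
      constructor
      · intro sp f la
        rw [hlen]
        by_cases hc : c = ' '
        · subst hc
          rw [scanB_snoc_space]
          simp only [aLoop, hg, aStep]
          have hy := ih1 true f la
          rw [hm'] at hy
          simp [aLoop_prefix es ' ' m hmlt, hy]
        · rw [scanB_snoc_word es c hc]
          simp only [aLoop, hg, aStep, if_neg hc]
          have hy := ih2 ((m : Int) + 1)
          rw [hm'] at hy
          have hcast : ((es.length : Nat) : Int) = (m : Int) + 1 := by rw [hm]; push_cast; ring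
          rw [hcast] at hy
          simp [aLoop_prefix es c m hmlt, hy, hcast]
      · intro la
        rw [hlen]
        by_cases hc : c = ' '
        · subst hc
          rw [splitTrail_snoc_space, scanB_snoc_space]
          simp only [aLoop, hg, aStep]
          have hy := ih1 true ((m : Int) + 1 + 1) la
          rw [hm'] at hy
          have hcast2 : (((es ++ [' ']).length : Nat) : Int) = (m : Int) + 1 + 1 := by
            simp [hm]
          simp [aLoop_prefix es ' ' m hmlt, hy, hcast2, hm]
        · rw [splitTrail_snoc_nonspace es c hc]
          simp only [aLoop, hg, aStep, if_neg hc]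
          have hy := ih2 la
          rw [hm'] at hy
          have hcast : ((es.length : Nat) : Int) = (m : Int) + 1 := by rw [hm]; push_cast; ring
          rw [hcast] at hy
          simp [aLoop_prefix es c m hmlt, hy]

-- ===== VERDICT (by name: the statement is the Claim_ definition above) =====
theorem iter_words_py_spec : Claim_equal_iter_words_py := by
  intro s _
  unfold Spec_iter_words_py iter_words_py iter_words_py_alt
  cases hcs : s.toList with
  | nil => simp [scanB]
  | cons d t =>
    have h := (main_inv (d :: t) (by simp)).1 false ((t.length : Int)) ((t.length : Int))
    simpa using h
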